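-- pv_equiv track=rewrite | github.com/Stopone02/CodingStudy | 프로그래머스/0/120815. 피자 나눠 먹기 （2）/피자 나눠 먹기 （2）.py | solution
-- ===== SOURCE A (Python) =====
-- def solution(n):
--     number = 0
--     while True:
--         number += 1
--         if n*number%6 == 0:
--             answer = n*number//6
--             break
--     return answer
-- ===== SOURCE B (Python) =====
-- import math
--
-- def solution(n):
--     return n // math.gcd(n, 6)
-- ===== Notes on version B (the rewrite author's own statement) =====
-- stated objective: simpler
-- what changed: Replaced the while-loop search for the smallest multiplier with the closed form n // gcd(n, 6), since the loop computes lcm(n,6)/6 = n/gcd(n,6).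
import Mathlib
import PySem

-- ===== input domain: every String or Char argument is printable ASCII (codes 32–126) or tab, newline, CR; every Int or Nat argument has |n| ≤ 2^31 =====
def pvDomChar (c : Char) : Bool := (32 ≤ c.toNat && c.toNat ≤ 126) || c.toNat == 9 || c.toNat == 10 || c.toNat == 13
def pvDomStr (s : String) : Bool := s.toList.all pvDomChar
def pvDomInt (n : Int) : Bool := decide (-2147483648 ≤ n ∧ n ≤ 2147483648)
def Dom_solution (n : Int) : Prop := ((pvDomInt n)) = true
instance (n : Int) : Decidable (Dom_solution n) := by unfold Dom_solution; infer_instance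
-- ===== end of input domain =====

-- B replaces A's while-loop search by the closed form n // gcd(n, 6); objective: simpler.

-- ===== PORT A =====
-- A's `while True` loop stepping number = 1, 2, …; it always exits by number = 6
-- (n*6 % 6 = 0), so fuel 6 is a pure totality guard, never reached before exit.
def solLoop (n : Int) (fuel : Nat) (number : Int) : Int :=
  match fuel with
  | 0 => 0
  | f + 1 =>
    let number := number + 1
    if PySem.Int.mod (n * number) 6 = 0 then PySem.Int.floordiv (n * number) 6
    else solLoop n f number

def solution (n : Int) : Int := solLoop n 6 0

-- ===== PORT B =====
def solution_alt (n : Int) : Int := PySem.Int.floordiv n (Int.gcd n 6)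

-- ===== PRECONDITION & SPEC =====
def Spec_solution (n : Int) (out : Int) : Prop := out = solution_alt n
instance (n : Int) (out : Int) : Decidable (Spec_solution n out) := by unfold Spec_solution; infer_instance

-- ===== CLAIM (what is proved, stated in full; the proofs are below) =====
def Claim_equal_solution : Prop := ∀ (n : Int), Dom_solution n → Spec_solution n (solution n)

-- ===== LEMMAS AND PROOFS =====

-- ===== VERDICT (by name: the statement is the Claim_ definition above) =====
theorem solution_spec : Claim_equal_solution := by
  intro n _
  unfold Spec_solution solution solution_alt
  obtain ⟨q, r, hr0, hr6, hn⟩ : ∃ q r : Int, 0 ≤ r ∧ r < 6 ∧ n = r + 6*q :=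
    ⟨n / 6, n % 6, Int.emod_nonneg n (by norm_num), by omega, by omega⟩
  subst hn
  rw [Int.gcd_add_mul_left_left 6 r q]
  have hm : ∀ a : Int, PySem.Int.mod a 6 = a % 6 :=
    fun a => PySem.Int.mod_eq_emod_of_pos (by norm_num)
  have hd : ∀ a b : Int, 0 < b → PySem.Int.floordiv a b = a / b :=
    fun a b h => PySem.Int.floordiv_eq_ediv_of_pos h
  interval_cases r <;>
    simp only [solLoop, hm, hd _ _ (by decide : (0:Int) < 6)] <;>
    norm_num [Int.gcd] <;>
    omega
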